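-- pv_equiv track=rewrite | github.com/adhithyan15/coding-adventures | code/packages/python/cas-factor/src/cas_factor/bzh.py | _iz_sub
-- ===== SOURCE A (Python) =====
-- def _iz_sub(a: list[int], b: list[int]) -> list[int]:
--     """Subtract b from a (exact integer polynomials)."""
--     n = max(len(a), len(b))
--     result = [0] * n
--     for i, c in enumerate(a):
--         result[i] += c
--     for i, c in enumerate(b):
--         result[i] -= c
--     while result and result[-1] == 0:
--         result.pop()
--     return result
-- ===== SOURCE B (Python) =====
-- def _iz_sub(a: list[int], b: list[int]) -> list[int]:
--     """Subtract b from a (exact integer polynomials)."""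
--     out = []
--     for i in range(max(len(a), len(b)) - 1, -1, -1):
--         d = (a[i] if i < len(a) else 0) - (b[i] if i < len(b) else 0)
--         if out or d != 0:
--             out.append(d)
--     out.reverse()
--     return out
-- ===== Notes on version B (the rewrite author's own statement) =====
-- stated objective: alternative
-- what changed: B walks the coefficients once from highest degree downward with a conditional accumulator that skips leading (i.e. trailing-degree) zeros as it goes, so trimming is fused into the single backward pass; A instead mutates a zero-padded array in two forward index-assignment loops and then trims with a separate backward pop loop.
import Mathlib
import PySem

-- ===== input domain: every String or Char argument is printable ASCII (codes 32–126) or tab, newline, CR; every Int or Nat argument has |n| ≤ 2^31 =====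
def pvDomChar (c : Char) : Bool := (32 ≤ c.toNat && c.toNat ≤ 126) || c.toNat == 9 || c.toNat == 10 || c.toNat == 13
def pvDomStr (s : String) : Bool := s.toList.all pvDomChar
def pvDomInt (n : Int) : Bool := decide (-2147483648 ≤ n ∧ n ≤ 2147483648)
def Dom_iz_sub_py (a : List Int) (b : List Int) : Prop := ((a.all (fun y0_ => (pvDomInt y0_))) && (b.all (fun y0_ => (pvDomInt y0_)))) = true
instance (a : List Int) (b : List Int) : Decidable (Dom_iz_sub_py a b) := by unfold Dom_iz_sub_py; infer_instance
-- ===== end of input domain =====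

-- B is an alternative of the same cost: one backward pass from the highest degree with a
-- conditional accumulator fusing the trim, instead of A's two forward loops over a
-- zero-padded array plus a backward pop-trim loop.

-- ===== PORT A =====
-- result[i] += c  (index from enumerate, always ≥ 0 and in range)
def pvAddStep (res : List Int) (ic : Int × Int) : List Int :=
  res.set ic.1.toNat (res.getD ic.1.toNat 0 + ic.2)

-- result[i] -= c
def pvSubStep (res : List Int) (ic : Int × Int) : List Int :=
  res.set ic.1.toNat (res.getD ic.1.toNat 0 - ic.2)

def iz_sub_py (a : List Int) (b : List Int) : List Int :=
  let n := max a.length b.length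
  let result := List.replicate n (0 : Int)
  let result := (PySem.List.enumerate a 0).foldl pvAddStep result
  let result := (PySem.List.enumerate b 0).foldl pvSubStep result
  -- while result and result[-1] == 0: result.pop()  — drop trailing zeros from the end
  (result.reverse.dropWhile (fun x => x == 0)).reverse

-- ===== PORT B =====
-- d = (a[i] if i < len(a) else 0) - (b[i] if i < len(b) else 0); 0 ≤ i < len, so a[i] = getD
def pvDiffAt (a : List Int) (b : List Int) (i : Int) : Int :=
  (if i < (a.length : Int) then a.getD i.toNat 0 else 0)
    - (if i < (b.length : Int) then b.getD i.toNat 0 else 0)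

def iz_sub_py_alt (a : List Int) (b : List Int) : List Int :=
  let out := (PySem.List.pyRange ((max a.length b.length : Int) - 1) (-1) (-1)).foldl
    (fun out i =>
      let d := pvDiffAt a b i
      if out ≠ [] ∨ d ≠ 0 then out ++ [d] else out) []
  out.reverse

-- ===== PRECONDITION & SPEC =====
def Spec_iz_sub_py (a : List Int) (b : List Int) (out : List Int) : Prop := out = iz_sub_py_alt a b
instance (a : List Int) (b : List Int) (out : List Int) : Decidable (Spec_iz_sub_py a b out) := by unfold Spec_iz_sub_py; infer_instance

-- ===== CLAIM (what is proved, stated in full; the proofs are below) =====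
def Claim_equal_iz_sub_py : Prop := ∀ (a : List Int) (b : List Int), Dom_iz_sub_py a b → Spec_iz_sub_py a b (iz_sub_py a b)

-- ===== LEMMAS AND PROOFS =====

-- the pointwise difference of coefficients (0 beyond either list)
def pvF (a b : List Int) (j : Nat) : Int := a.getD j 0 - b.getD j 0

lemma set_map_range {n k : Nat} (g : Nat → Int) (v : Int) (_hk : k < n) :
    ((List.range n).map g).set k v = (List.range n).map (fun j => if j = k then v else g j) := by
  apply List.ext_getElem <;> simp
  intro i hi
  rw [List.getElem_set]
  simp only [List.getElem_map, List.getElem_range]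
  by_cases h : k = i <;> simp [h] <;> omega

lemma foldl_set_enum (op : Int → Int → Int) :
    ∀ (xs : List Int) (n k : Nat) (g : Nat → Int), k + xs.length ≤ n →
    (PySem.List.enumerate xs (k : Int)).foldl
        (fun res ic => res.set ic.1.toNat (op (res.getD ic.1.toNat 0) ic.2))
        ((List.range n).map g)
      = (List.range n).map
          (fun j => if k ≤ j ∧ j < k + xs.length then op (g j) (xs.getD (j - k) 0) else g j) := by
  intro xs
  induction xs with
  | nil =>
    intro n k g _
    simp only [PySem.List.enumerate_nil, List.foldl_nil]
    apply List.map_congr_left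
    intro j hj
    have : ¬ (k ≤ j ∧ j < k + List.length ([] : List Int)) := by simp
    simp [this]
  | cons x xs ih =>
    intro n k g h
    have hk : k < n := by simp at h; omega
    rw [PySem.List.enumerate_cons, List.foldl_cons]
    have hget : (((List.range n).map g).getD ((k : Int)).toNat 0) = g k := by
      simp [List.getD, List.getElem?_map, List.getElem?_range, hk]
    have hset : ((List.range n).map g).set ((k : Int)).toNat (op (((List.range n).map g).getD ((k : Int)).toNat 0) x)
        = (List.range n).map (fun j => if j = k then op (g k) x else g j) := by
      rw [hget]; simpa using set_map_range g (op (g k) x) hk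
    rw [hset]
    have hcast : ((k : Int) + 1) = ((k + 1 : Nat) : Int) := by push_cast; ring
    rw [hcast, ih n (k + 1) _ (by simp at h ⊢; omega)]
    apply List.map_congr_left
    intro j hj
    simp only [List.length_cons]
    by_cases hjk : j = k
    · subst hjk
      rw [if_neg (by omega : ¬ (j + 1 ≤ j ∧ j < j + 1 + xs.length)),
          if_pos (by omega : j = j),
          if_pos (by omega : j ≤ j ∧ j < j + (xs.length + 1))]
      simp
    · rw [if_neg hjk]
      by_cases hin : k + 1 ≤ j ∧ j < k + 1 + xs.length
      · rw [if_pos hin, if_pos (by omega : k ≤ j ∧ j < k + (xs.length + 1))]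
        have hs : j - k = (j - k - 1) + 1 := by omega
        rw [hs, List.getD_cons_succ]
        have h3 : j - (k + 1) = j - k - 1 := by omega
        rw [h3]
      · rw [if_neg hin, if_neg (by omega : ¬ (k ≤ j ∧ j < k + (xs.length + 1)))]

lemma replicate_eq_map_range (n : Nat) :
    List.replicate n (0 : Int) = (List.range n).map (fun _ => 0) := by
  apply List.ext_getElem <;> simp

-- A's array after both loops holds the pointwise differences
lemma loops_eq (a b : List Int) :
    (PySem.List.enumerate b 0).foldl pvSubStep
        ((PySem.List.enumerate a 0).foldl pvAddStep
          (List.replicate (max a.length b.length) (0 : Int)))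
      = (List.range (max a.length b.length)).map (pvF a b) := by
  set n := max a.length b.length with hn
  have ha : a.length ≤ n := by omega
  have hb : b.length ≤ n := by omega
  have step1 : (PySem.List.enumerate a 0).foldl pvAddStep (List.replicate n (0 : Int))
      = (List.range n).map (fun j => a.getD j 0) := by
    rw [replicate_eq_map_range]
    have := foldl_set_enum (fun u v => u + v) a n 0 (fun _ => 0) (by omega)
    simp only [Nat.cast_zero] at this
    rw [show pvAddStep = (fun res (ic : Int × Int) =>
        res.set ic.1.toNat ((fun u v => u + v) (res.getD ic.1.toNat 0) ic.2)) from rfl, this]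
    apply List.map_congr_left
    intro j hj
    by_cases hja : j < a.length
    · simp [hja]
    · simp [hja, List.getD_eq_default _ _ (show a.length ≤ j by omega)]
  rw [step1]
  have := foldl_set_enum (fun u v => u - v) b n 0 (fun j => a.getD j 0) (by omega)
  simp only [Nat.cast_zero] at this
  rw [show pvSubStep = (fun res (ic : Int × Int) =>
      res.set ic.1.toNat ((fun u v => u - v) (res.getD ic.1.toNat 0) ic.2)) from rfl, this]
  apply List.map_congr_left
  intro j hj
  by_cases hjb : j < b.length
  · simp [hjb, pvF]
  · simp [hjb, pvF, List.getD_eq_default _ _ (show b.length ≤ j by omega)]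

-- B's accumulator step, over coefficient VALUES
def pvBStep (out : List Int) (d : Int) : List Int :=
  if out ≠ [] ∨ d ≠ 0 then out ++ [d] else out

-- once nonempty, the accumulator just appends everything
lemma foldl_pvBStep_ne : ∀ (ds acc : List Int), acc ≠ [] →
    List.foldl pvBStep acc ds = acc ++ ds := by
  intro ds
  induction ds with
  | nil => intro acc _; simp
  | cons d rest ih =>
    intro acc h
    rw [List.foldl_cons, pvBStep, if_pos (Or.inl h), ih _ (by simp)]
    simp

-- from empty, the accumulator skips exactly the leading zeros
lemma foldl_pvBStep_nil : ∀ (ds : List Int),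
    List.foldl pvBStep [] ds = ds.dropWhile (fun x => x == 0) := by
  intro ds
  induction ds with
  | nil => simp
  | cons d rest ih =>
    by_cases hd : d = 0
    · subst hd
      rw [List.foldl_cons, pvBStep, if_neg (by simp), ih, List.dropWhile_cons]
      simp
    · rw [List.foldl_cons, pvBStep, if_pos (Or.inr hd),
          foldl_pvBStep_ne _ _ (by simp), List.dropWhile_cons]
      simp [hd]

-- the descending index list, mapped through pvDiffAt, is the reversed coefficient list
lemma map_diff_desc (a b : List Int) :
    (PySem.List.pyRange ((max a.length b.length : Int) - 1) (-1) (-1)).map (pvDiffAt a b)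
      = ((List.range (max a.length b.length)).map (pvF a b)).reverse := by
  set n := max a.length b.length with hn
  rw [PySem.List.pyRange_neg_one]
  have hlen : ((max (a.length : Int) (b.length : Int) - 1) - (-1)).toNat = n := by omega
  rw [hlen]
  apply List.ext_getElem
  · simp
  · intro k h1 h2
    simp only [List.map_map, List.getElem_map, List.getElem_range] at h1 ⊢
    rw [List.getElem_reverse]
    simp only [List.length_map, List.length_range] at h1 ⊢
    simp only [List.getElem_map, List.getElem_range]
    have hk : k < n := h1
    have hidx : (max (a.length : Int) (b.length : Int) - 1 - (k : Int)) = ((n - 1 - k : Nat) : Int) := by omega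
    rw [Function.comp, hidx]
    unfold pvDiffAt pvF
    have ht : ((n - 1 - k : Nat) : Int).toNat = n - 1 - k := by omega
    rw [ht]
    by_cases hja : n - 1 - k < a.length
    · by_cases hjb : n - 1 - k < b.length
      · rw [if_pos (by exact_mod_cast hja), if_pos (by exact_mod_cast hjb)]
      · rw [if_pos (by exact_mod_cast hja), if_neg (by push_cast; omega),
            List.getD_eq_default _ _ (show b.length ≤ n - 1 - k by omega)]
    · by_cases hjb : n - 1 - k < b.length
      · rw [if_neg (by push_cast; omega), if_pos (by exact_mod_cast hjb),
            List.getD_eq_default _ _ (show a.length ≤ n - 1 - k by omega)]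
      · rw [if_neg (by push_cast; omega), if_neg (by push_cast; omega),
            List.getD_eq_default _ _ (show a.length ≤ n - 1 - k by omega),
            List.getD_eq_default _ _ (show b.length ≤ n - 1 - k by omega)]

-- ===== VERDICT (by name: the statement is the Claim_ definition above) =====
theorem iz_sub_py_spec : Claim_equal_iz_sub_py := by
  intro a b _
  unfold Spec_iz_sub_py iz_sub_py iz_sub_py_alt
  simp only []
  rw [loops_eq]
  have hfold : (PySem.List.pyRange ((max a.length b.length : Int) - 1) (-1) (-1)).foldl
      (fun out i => let d := pvDiffAt a b i
        if out ≠ [] ∨ d ≠ 0 then out ++ [d] else out) []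
      = ((List.range (max a.length b.length)).map (pvF a b)).reverse.dropWhile (fun x => x == 0) := by
    rw [show (fun out i => let d := pvDiffAt a b i
          if out ≠ [] ∨ d ≠ 0 then out ++ [d] else out)
        = (fun out i => pvBStep out (pvDiffAt a b i)) from rfl,
        ← List.foldl_map, map_diff_desc, foldl_pvBStep_nil]
  rw [hfold]
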